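-- pv_equiv track=rewrite | github.com/adanthony53/cse415 | a1.py | mystery_code
-- ===== SOURCE A (Python) =====
-- def mystery_code(text):
--     if type(text) != str:
--         return "Invalid Input!"
--     res = ""
--     for ch in text:
--         if ch.isalpha():
--             if ch.isupper():
--                 CH = chr(97 + (ord(ch) - 46) % 26)
--             else:
--                 CH = chr(65 + (ord(ch) - 78) % 26)
--         else:
--             CH = ch
--
--         res = res + CH
--     return res
-- ===== SOURCE B (Python) =====
-- def mystery_code(text):
--     if type(text) != str:
--         return "Invalid Input!"
--     # cipher alphabet built by slice rotation: no per-character arithmetic at all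
--     upper = "ABCDEFGHIJKLMNOPQRSTUVWXYZ"
--     lower = "abcdefghijklmnopqrstuvwxyz"
--     plain = upper + lower
--     cipher = lower[19:] + lower[:19] + upper[19:] + upper[:19]
--     out = []
--     for ch in text:
--         i = plain.find(ch)
--         out.append(cipher[i] if i >= 0 else ch)
--     return "".join(out)
-- ===== Notes on version B (the rewrite author's own statement) =====
-- stated objective: alternative
-- what changed: B replaces A's per-character ordinal arithmetic and case branches with a table-free lookup cipher: the cipher alphabet is built once by slice-rotating constant alphabet strings, and each character is mapped by its index found in the plain alphabet (plain.find), non-matches passing through.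
import Mathlib
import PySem

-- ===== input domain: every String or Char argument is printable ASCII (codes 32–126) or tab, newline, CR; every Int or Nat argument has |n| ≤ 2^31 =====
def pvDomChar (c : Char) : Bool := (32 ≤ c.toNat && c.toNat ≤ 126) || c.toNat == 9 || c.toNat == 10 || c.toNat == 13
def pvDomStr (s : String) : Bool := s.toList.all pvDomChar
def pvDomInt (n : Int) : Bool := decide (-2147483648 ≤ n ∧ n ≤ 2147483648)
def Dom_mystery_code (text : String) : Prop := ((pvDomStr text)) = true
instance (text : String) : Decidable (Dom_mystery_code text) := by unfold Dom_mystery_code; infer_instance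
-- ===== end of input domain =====

-- B builds the cipher alphabet once by slice-rotating constant alphabet strings and maps each
-- character by its index found in the plain alphabet, replacing A's per-character ordinal
-- arithmetic and case branches (objective: alternative, same cost).

set_option maxRecDepth 10000


-- ===== PORT A =====
-- per-character loop: res = res + CH, with A's branch order kept
def mcStepA (ch : Char) : Char :=
  if PySem.Chars.isalpha ch then
    if PySem.Chars.isupper ch then
      Char.ofNat (97 + PySem.Int.mod ((ch.toNat : Int) - 46) 26).toNat
    else
      Char.ofNat (65 + PySem.Int.mod ((ch.toNat : Int) - 78) 26).toNat
  else ch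

def mystery_code (text : String) : String :=
  String.ofList (text.toList.foldl (fun res ch => res ++ [mcStepA ch]) [])

-- ===== PORT B =====
def mcUpper : List Char := "ABCDEFGHIJKLMNOPQRSTUVWXYZ".toList
def mcLower : List Char := "abcdefghijklmnopqrstuvwxyz".toList
def mcPlain : List Char := mcUpper ++ mcLower
-- cipher = lower[19:] + lower[:19] + upper[19:] + upper[:19]
def mcCipher : List Char :=
  PySem.List.slice mcLower (some 19) none ++ PySem.List.slice mcLower none (some 19) ++
  PySem.List.slice mcUpper (some 19) none ++ PySem.List.slice mcUpper none (some 19)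

-- i = plain.find(ch); cipher[i] if i >= 0 else ch  (the .getD makes cipher[i] total; for
-- 0 ≤ i = find result, i < 52 so pyGet? is always some, exactly Python's in-range indexing)
def mcStepB (ch : Char) : Char :=
  let i : Int := PySem.Chars.find mcPlain [ch]
  if 0 ≤ i then (PySem.List.pyGet? mcCipher i).getD ch else ch

def mystery_code_alt (text : String) : String :=
  String.ofList (text.toList.foldl (fun out ch => out ++ [mcStepB ch]) [])

-- ===== PRECONDITION & SPEC =====
def Spec_mystery_code (text : String) (out : String) : Prop := out = mystery_code_alt text
instance (text : String) (out : String) : Decidable (Spec_mystery_code text out) := by unfold Spec_mystery_code; infer_instance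

-- ===== CLAIM =====
def Claim_equal_mystery_code : Prop := ∀ (text : String), Dom_mystery_code text → Spec_mystery_code text (mystery_code text)

-- ===== LEMMAS AND PROOFS =====
-- per character: A's arithmetic transform equals B's alphabet lookup, for every domain character
theorem mcStep_eq (c : Char) (h : pvDomChar c = true) : mcStepA c = mcStepB c := by
  have hc : Char.ofNat c.toNat = c := Char.ofNat_toNat c
  have hle : c.toNat ≤ 126 := by
    simp [pvDomChar] at h
    omega
  rw [← hc]
  interval_cases h' : c.toNat <;> decide

theorem mc_fold_eq (l : List Char) (h : ∀ c ∈ l, pvDomChar c = true) (acc : List Char) :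
    l.foldl (fun res ch => res ++ [mcStepA ch]) acc
      = l.foldl (fun out ch => out ++ [mcStepB ch]) acc := by
  induction l generalizing acc with
  | nil => rfl
  | cons c l ih =>
    simp only [List.foldl_cons]
    rw [mcStep_eq c (h c List.mem_cons_self), ih (fun x hx => h x (List.mem_cons_of_mem _ hx))]

-- ===== VERDICT =====
theorem mystery_code_spec : Claim_equal_mystery_code := by
  intro text hdom
  unfold Spec_mystery_code mystery_code mystery_code_alt
  have h : ∀ c ∈ text.toList, pvDomChar c = true := by
    simpa [Dom_mystery_code, pvDomStr, List.all_eq_true] using hdom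
  rw [mc_fold_eq _ h []]
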